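-- pv_equiv track=rewrite | github.com/LSSI-ETH/plmfit | plmfit/data/aav/data_parse.py | get_mutation_positions
-- ===== SOURCE A (Python) =====
-- def get_mutation_positions(wildtype_seq, region, mask):
--     start_pos = wildtype_seq.find(
--         region
--     )  # Find the starting position of the mutated region
--     end_pos = len(mask)  # Ending position of the mutated region
--     positions = []
--     deletions = 0 # Track deletions because we need to subtract one positions for each deletion
--     for i in range(end_pos):
--         mask_char = mask[i]
--         if mask_char != '_':
--             if mask_char == '*':
--                 deletions = deletions + 1
--             else:
--                 positions.append(i + start_pos - deletions)
--     return positions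
-- ===== SOURCE B (Python) =====
-- def get_mutation_positions(wildtype_seq, region, mask):
--     # Staged: first drop deletions ('*'), then the j-th kept character sits at
--     # sequence position start+j, so select the non-'_' ones by their index.
--     start = wildtype_seq.find(region)
--     kept = mask.replace('*', '')
--     return [start + j for j, c in enumerate(kept) if c != '_']
-- ===== Notes on version B (the rewrite author's own statement) =====
-- stated objective: simpler
-- what changed: Two staged passes (strip all '*' first, then an enumerate comprehension over the kept characters) replace A's single indexed loop with a mutable deletions counter and index arithmetic.
import Mathlib
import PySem

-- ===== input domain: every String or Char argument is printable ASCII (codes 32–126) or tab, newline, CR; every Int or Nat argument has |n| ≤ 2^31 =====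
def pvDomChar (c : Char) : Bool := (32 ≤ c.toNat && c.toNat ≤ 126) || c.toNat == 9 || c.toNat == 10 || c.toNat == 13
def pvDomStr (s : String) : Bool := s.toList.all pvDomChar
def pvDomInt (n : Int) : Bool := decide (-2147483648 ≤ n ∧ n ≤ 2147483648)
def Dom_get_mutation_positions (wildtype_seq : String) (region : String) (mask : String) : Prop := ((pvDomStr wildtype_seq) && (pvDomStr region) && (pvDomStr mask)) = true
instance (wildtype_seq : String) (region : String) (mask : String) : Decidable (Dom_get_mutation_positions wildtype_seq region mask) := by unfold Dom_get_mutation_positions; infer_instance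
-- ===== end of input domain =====

-- B computes the result in two staged passes (strip '*' deletions, then an enumerate
-- comprehension over the kept characters) instead of A's indexed loop with a deletions
-- counter: simpler decomposition, same cost.

-- ===== PORT A =====
-- literal transliteration of A: indexed loop over range(len(mask)), state = (positions, deletions)
def get_mutation_positions (wildtype_seq : String) (region : String) (mask : String) : List Int :=
  let start_pos := PySem.Str.find wildtype_seq region
  let end_pos := PySem.Str.len mask
  let st :=
    (PySem.List.pyRange 0 end_pos 1).foldl
      (fun (s : List Int × Int) i =>
        let mask_char := PySem.List.pyGetD mask.toList i ' '   -- mask[i]; i always in range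
        if mask_char ≠ '_' then
          if mask_char = '*' then (s.1, s.2 + 1)
          else (s.1 ++ [i + start_pos - s.2], s.2)
        else s)
      ([], 0)
  st.1

-- ===== PORT B =====
-- staged passes: mask.replace('*','') removes exactly the '*' characters (= filter),
-- then the enumerate comprehension selects indices of non-'_' characters
def get_mutation_positions_alt (wildtype_seq : String) (region : String) (mask : String) : List Int :=
  let start := PySem.Str.find wildtype_seq region
  let kept := mask.toList.filter (· ≠ '*')       -- mask.replace('*', '')
  ((PySem.List.enumerate kept 0).filter (fun p => p.2 ≠ '_')).map (fun p => start + p.1)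

-- ===== PRECONDITION & SPEC =====
def Spec_get_mutation_positions (wildtype_seq : String) (region : String) (mask : String) (out : List Int) : Prop := out = get_mutation_positions_alt wildtype_seq region mask
instance (wildtype_seq : String) (region : String) (mask : String) (out : List Int) : Decidable (Spec_get_mutation_positions wildtype_seq region mask out) := by unfold Spec_get_mutation_positions; infer_instance

-- ===== CLAIM =====
def Claim_equal_get_mutation_positions : Prop := ∀ (wildtype_seq : String) (region : String) (mask : String), Dom_get_mutation_positions wildtype_seq region mask → Spec_get_mutation_positions wildtype_seq region mask (get_mutation_positions wildtype_seq region mask)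

-- ===== LEMMAS AND PROOFS =====

-- proof-side bridge: a one-pass recursion both sides are reduced to
def gmpGo (pos : Int) : List Char → List Int
  | [] => []
  | c :: cs =>
      if c = '*' then gmpGo pos cs
      else if c = '_' then gmpGo (pos + 1) cs
      else pos :: gmpGo (pos + 1) cs

-- Loop invariant for A's fold: starting at index a with deletion count d and accumulator acc,
-- the positions component equals acc ++ gmpGo over the remaining suffix with pos = a + start - d.
theorem gmp_fold_inv (cs : List Char) (start : Int) :
    ∀ (suf : List Char) (a : Nat), cs.drop a = suf → a ≤ cs.length →
    ∀ (acc : List Int) (d : Int),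
      ((PySem.List.pyRange (a : Int) (cs.length : Int) 1).foldl
        (fun (s : List Int × Int) i =>
          let mask_char := PySem.List.pyGetD cs i ' '
          if mask_char ≠ '_' then
            if mask_char = '*' then (s.1, s.2 + 1)
            else (s.1 ++ [i + start - s.2], s.2)
          else s)
        (acc, d)).1 = acc ++ gmpGo ((a : Int) + start - d) suf := by
  intro suf
  induction suf with
  | nil =>
      intro a hdrop hle acc d
      have ha : a = cs.length := by
        have := congrArg List.length hdrop
        simp at this; omega
      subst ha
      rw [PySem.List.pyRange_one_eq_nil (by omega)]
      simp [gmpGo]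
  | cons c suf ih =>
      intro a hdrop hle acc d
      have hlt : a < cs.length := by
        by_contra h
        rw [List.drop_eq_nil_of_le (by omega)] at hdrop
        simp at hdrop
      have h0 : (cs.drop a)[0]? = some c := by rw [hdrop]; rfl
      rw [List.getElem?_drop] at h0
      have hget : cs.getD a ' ' = c := by simp at h0; simp [List.getD, h0]
      have hdrop' : cs.drop (a + 1) = suf := by
        rw [← List.drop_drop, hdrop]; rfl
      rw [PySem.List.pyRange_one_cons (by exact_mod_cast hlt)]
      simp only [List.foldl_cons]
      rw [PySem.List.pyGetD_natCast, hget]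
      by_cases hstar : c = '*'
      · subst hstar
        have h2 := ih (a + 1) hdrop' (by omega) acc (d + 1)
        rw [show ((a + 1 : Nat) : Int) + start - (d + 1) = (a : Int) + start - d by push_cast; ring] at h2
        push_cast at h2 ⊢
        simpa [gmpGo] using h2
      · by_cases hus : c = '_'
        · subst hus
          have h2 := ih (a + 1) hdrop' (by omega) acc d
          rw [show ((a + 1 : Nat) : Int) + start - d = ((a : Int) + start - d) + 1 by push_cast; ring] at h2
          push_cast at h2 ⊢
          simpa [gmpGo, hstar] using h2
        · have h2 := ih (a + 1) hdrop' (by omega) (acc ++ [(a : Int) + start - d]) d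
          rw [show ((a + 1 : Nat) : Int) + start - d = ((a : Int) + start - d) + 1 by push_cast; ring] at h2
          push_cast at h2 ⊢
          simpa [gmpGo, hstar, hus] using h2

-- B's staged filter/enumerate/map computation equals the one-pass recursion
theorem gmp_link (cs : List Char) :
    ∀ (pos s : Int),
      ((PySem.List.enumerate (cs.filter (· ≠ '*')) s).filter (fun p => p.2 ≠ '_')).map
        (fun p => pos + p.1) = gmpGo (pos + s) cs := by
  induction cs with
  | nil => intro pos s; simp [gmpGo, PySem.List.enumerate_nil]
  | cons c cs ih =>
      intro pos s
      by_cases hstar : c = '*'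
      · simpa [gmpGo, hstar] using ih pos s
      · by_cases hus : c = '_'
        · have h := ih pos (s + 1)
          rw [show pos + (s + 1) = (pos + s) + 1 by ring] at h
          simpa [gmpGo, hstar, hus, PySem.List.enumerate_cons] using h
        · have h := ih pos (s + 1)
          rw [show pos + (s + 1) = (pos + s) + 1 by ring] at h
          simpa [gmpGo, hstar, hus, PySem.List.enumerate_cons] using h

-- ===== VERDICT =====
theorem get_mutation_positions_spec : Claim_equal_get_mutation_positions := by
  intro w r m _
  unfold Spec_get_mutation_positions get_mutation_positions get_mutation_positions_alt
  have h := gmp_fold_inv m.toList (PySem.Str.find w r) m.toList 0 (by simp) (by omega) [] 0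
  simp only [Nat.cast_zero] at h
  have h2 := gmp_link m.toList (PySem.Str.find w r) 0
  simp only [add_zero] at h2
  simp only [PySem.Str.len]
  rw [h, h2]
  simp
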